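-- pv_equiv track=rewrite | github.com/PrincessAzula1/scanner | memory_test.py | _find_differing_bit
-- ===== SOURCE A (Python) =====
-- from typing import List, Dict, Optional, Tuple, Callable, Any
--
-- def _find_differing_bit(expected: int, actual: int) -> Optional[int]:
--     """Find which bit differs"""
--     diff = expected ^ actual
--     if diff == 0:
--         return None
--     # Return position of first differing bit
--     for i in range(8):
--         if diff & (1 << i):
--             return i
--     return None
-- ===== SOURCE B (Python) =====
-- from typing import Optional
--
-- def _find_differing_bit(expected: int, actual: int) -> Optional[int]:
--     """Find which bit differs (closed-form: isolate lowest set bit of the low byte)"""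
--     diff = (expected ^ actual) & 0xFF
--     if diff == 0:
--         return None
--     return (diff & -diff).bit_length() - 1
-- ===== Notes on version B (the rewrite author's own statement) =====
-- stated objective: idiomatic
-- what changed: Replaces the per-bit linear scan over range(8) with a closed-form bit trick: mask the xor to the low byte, isolate the lowest set bit with diff & -diff, and read its position via bit_length() - 1.
import Mathlib
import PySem

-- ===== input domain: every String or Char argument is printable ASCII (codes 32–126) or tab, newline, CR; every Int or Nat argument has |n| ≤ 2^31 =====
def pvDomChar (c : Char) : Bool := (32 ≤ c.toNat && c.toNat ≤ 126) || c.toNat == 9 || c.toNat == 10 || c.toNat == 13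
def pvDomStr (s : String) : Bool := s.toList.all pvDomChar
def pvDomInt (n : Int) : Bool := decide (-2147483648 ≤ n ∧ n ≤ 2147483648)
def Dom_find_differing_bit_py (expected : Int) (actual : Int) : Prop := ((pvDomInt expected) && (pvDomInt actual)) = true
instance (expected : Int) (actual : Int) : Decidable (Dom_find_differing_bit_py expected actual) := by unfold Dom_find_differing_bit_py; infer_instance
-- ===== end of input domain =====

-- ===== PORT A =====
-- B replaces A's per-bit scan over range(8) with a closed-form lowest-set-bit trick (objective: idiomatic).

-- for-loop of A with early return: first i in the list with diff & (1 << i) nonzero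
def pvLoopA (diff : Int) : List Int → Option Int
  | [] => none
  | i :: rest => if PySem.Int.band diff ((1 : Int) <<< i.toNat) ≠ 0 then some i else pvLoopA diff rest

def find_differing_bit_py (expected : Int) (actual : Int) : Option Int :=
  let diff := PySem.Int.bxor expected actual
  if diff = 0 then none
  else pvLoopA diff (PySem.List.pyRange 0 8 1)

-- ===== PORT B =====
def find_differing_bit_py_alt (expected : Int) (actual : Int) : Option Int :=
  let diff := PySem.Int.band (PySem.Int.bxor expected actual) 255
  if diff = 0 then none
  else some ((PySem.Int.bitLength (PySem.Int.band diff (-diff)) : Int) - 1)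

-- ===== PRECONDITION & SPEC =====
def Spec_find_differing_bit_py (expected : Int) (actual : Int) (out : Option Int) : Prop := out = find_differing_bit_py_alt expected actual
instance (expected : Int) (actual : Int) (out : Option Int) : Decidable (Spec_find_differing_bit_py expected actual out) := by unfold Spec_find_differing_bit_py; infer_instance

-- ===== CLAIM (what is proved, stated in full; the proofs are below) =====
def Claim_equal_find_differing_bit_py : Prop := ∀ (expected : Int) (actual : Int), Dom_find_differing_bit_py expected actual → Spec_find_differing_bit_py expected actual (find_differing_bit_py expected actual)

-- ===== LEMMAS AND PROOFS =====

-- x & 255 = x % 256 (Python semantics, negatives included)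
lemma pv_band255 (d : Int) : PySem.Int.band d 255 = d % 256 := by
  by_cases hd : 0 ≤ d
  · obtain ⟨n, rfl⟩ : ∃ n : Nat, d = (n : Int) := ⟨d.toNat, (Int.toNat_of_nonneg hd).symm⟩
    rw [show (255 : Int) = ((255 : Nat) : Int) from rfl, PySem.Int.band_natCast,
      show (255 : Nat) = 2 ^ 8 - 1 from rfl, Nat.and_two_pow_sub_one_eq_mod,
      show (2 : Nat) ^ 8 = 256 from rfl]
    omega
  · have hm : d = -(((-d - 1).toNat : Int)) - 1 := by omega
    set m : Nat := (-d - 1).toNat with hmdef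
    rw [PySem.Int.band.eq_1, if_neg (by omega), if_pos (by norm_num)]
    have h1 : ((255 : Int)).toNat = 255 := rfl
    rw [h1, Nat.and_comm, show (255 : Nat) = 2 ^ 8 - 1 from rfl, Nat.and_two_pow_sub_one_eq_mod,
      show (2 : Nat) ^ 8 = 256 from rfl]
    omega

-- bits 0..7 of d agree with the bits of d % 256
lemma pv_band_shift_mod (d : Int) (k : Nat) (hk : k < 8) :
    PySem.Int.band d ((1 : Int) <<< k) = PySem.Int.band (d % 256) ((1 : Int) <<< k) := by
  have hpow : (1 : Int) <<< k = ((2 ^ k : Nat) : Int) := by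
    rw [Int.shiftLeft_eq]; push_cast; ring
  rw [hpow]
  by_cases hd : 0 ≤ d
  · obtain ⟨n, rfl⟩ : ∃ n : Nat, d = (n : Int) := ⟨d.toNat, (Int.toNat_of_nonneg hd).symm⟩
    rw [show ((n : Int)) % 256 = ((n % 256 : Nat) : Int) from by omega,
      PySem.Int.band_natCast, PySem.Int.band_natCast]
    norm_cast
    rw [Nat.and_two_pow, Nat.and_two_pow, show (256 : Nat) = 2 ^ 8 from rfl,
      Nat.testBit_mod_two_pow]
    simp [hk]
  · have hm : d = -(((-d - 1).toNat : Int)) - 1 := by omega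
    set m : Nat := (-d - 1).toNat with hmdef
    have hr : d % 256 = ((255 - m % 256 : Nat) : Int) := by omega
    rw [hr, PySem.Int.band_natCast, PySem.Int.band.eq_1, if_neg (by omega), if_pos (by positivity)]
    have h1 : (((2 ^ k : Nat) : Int)).toNat = 2 ^ k := Int.toNat_natCast _
    rw [h1]
    norm_cast
    rw [Nat.two_pow_and, Nat.and_two_pow,
      show 255 - m % 256 = 2 ^ 8 - (m % 256 + 1) from by omega,
      Nat.testBit_two_pow_sub_succ (by omega : m % 256 < 2 ^ 8),
      show (256 : Nat) = 2 ^ 8 from rfl, Nat.testBit_mod_two_pow]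
    simp only [hk, decide_true, Bool.true_and]
    cases hb : m.testBit k <;> simp

-- the loop only looks at diff through band diff (1 << i)
lemma pvLoopA_congr (d d' : Int) (l : List Int)
    (h : ∀ i ∈ l, PySem.Int.band d ((1 : Int) <<< i.toNat) = PySem.Int.band d' ((1 : Int) <<< i.toNat)) :
    pvLoopA d l = pvLoopA d' l := by
  induction l with
  | nil => rfl
  | cons i rest ih =>
    simp only [pvLoopA, h i (List.mem_cons_self ..)]
    rw [ih fun j hj => h j (List.mem_cons_of_mem _ hj)]

-- on a byte-sized value, A's scan equals B's closed form (checked exhaustively)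
set_option maxRecDepth 8192 in
lemma pv_core : ∀ x : Fin 256,
    pvLoopA ((x.val : Int)) (PySem.List.pyRange 0 8 1) =
      (if ((x.val : Int)) = 0 then none
       else some (((PySem.Int.bitLength (PySem.Int.band ((x.val : Int)) (-((x.val : Int))))) : Int) - 1)) := by
  decide

lemma pv_core' (r : Int) (h0 : 0 ≤ r) (h1 : r < 256) :
    pvLoopA r (PySem.List.pyRange 0 8 1) =
      (if r = 0 then none
       else some (((PySem.Int.bitLength (PySem.Int.band r (-r))) : Int) - 1)) := by
  have hx := pv_core ⟨r.toNat, by omega⟩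
  simpa [Int.toNat_of_nonneg h0] using hx

-- ===== VERDICT (by name: the statement is the Claim_ definition above) =====
theorem find_differing_bit_py_spec : Claim_equal_find_differing_bit_py := by
  intro expected actual _
  unfold Spec_find_differing_bit_py find_differing_bit_py find_differing_bit_py_alt
  set d := PySem.Int.bxor expected actual with hd
  simp only [pv_band255]
  by_cases h0 : d = 0
  · simp [h0]
  · rw [if_neg h0]
    have hcong : pvLoopA d (PySem.List.pyRange 0 8 1) = pvLoopA (d % 256) (PySem.List.pyRange 0 8 1) := by
      apply pvLoopA_congr
      intro i hi
      rw [show PySem.List.pyRange 0 8 1 = [0, 1, 2, 3, 4, 5, 6, 7] from by decide] at hi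
      simp only [List.mem_cons, List.not_mem_nil, or_false] at hi
      rcases hi with rfl | rfl | rfl | rfl | rfl | rfl | rfl | rfl <;>
        exact pv_band_shift_mod d _ (by decide)
    rw [hcong, pv_core' (d % 256) (Int.emod_nonneg d (by norm_num)) (Int.emod_lt_of_pos d (by norm_num))]
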